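-- pv_equiv track=rewrite | github.com/oaxiom/demuxy | lib.py | generate_mismatches
-- ===== SOURCE A (Python) =====
-- def generate_mismatches(seq, num_mismatch, cdepth=1):
--     """
--     **Arguments**
--         a sequence
--     """
--     res = []
--
--     for idx, bp in enumerate(seq):
--         newseq = seq[0:idx] + "N" + seq[idx+1:]
--
--         res.append(newseq)
--         if cdepth < num_mismatch:
--             res = res + generate_mismatches(newseq, num_mismatch, cdepth+1)
--     return(res)
-- ===== SOURCE B (Python) =====
-- def generate_mismatches(seq, num_mismatch, cdepth=1):
--     """
--     **Arguments**
--         a sequence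
--     """
--     res = []
--     stack = [(seq[:i] + "N" + seq[i + 1:], cdepth) for i in range(len(seq))]
--     stack.reverse()
--     while stack:
--         s, level = stack.pop()
--         res.append(s)
--         if level < num_mismatch:
--             children = [(s[:i] + "N" + s[i + 1:], level + 1) for i in range(len(s))]
--             stack.extend(reversed(children))
--     return res
-- ===== Notes on version B (the rewrite author's own statement) =====
-- stated objective: alternative
-- what changed: Replaces the recursion that rebuilds the result with 'res = res + recursive_call' at every node by an explicit-stack iterative pre-order DFS that appends to one result list; Pre_ excludes deep-recursion inputs where A raises RecursionError.
import Mathlib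
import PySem

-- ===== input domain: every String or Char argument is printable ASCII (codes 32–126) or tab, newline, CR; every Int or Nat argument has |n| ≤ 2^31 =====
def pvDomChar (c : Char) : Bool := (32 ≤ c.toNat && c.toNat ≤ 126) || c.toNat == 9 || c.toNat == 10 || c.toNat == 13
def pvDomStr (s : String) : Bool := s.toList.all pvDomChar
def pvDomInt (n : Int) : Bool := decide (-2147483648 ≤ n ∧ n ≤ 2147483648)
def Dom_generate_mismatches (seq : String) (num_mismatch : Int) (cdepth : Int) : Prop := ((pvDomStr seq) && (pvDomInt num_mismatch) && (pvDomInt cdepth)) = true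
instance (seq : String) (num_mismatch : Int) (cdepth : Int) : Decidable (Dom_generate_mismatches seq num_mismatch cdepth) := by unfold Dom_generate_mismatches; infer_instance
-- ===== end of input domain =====

-- B replaces A's recursion (which rebuilds the result with `res = res + recursion`) by an
-- explicit-stack pre-order DFS that only appends; same return value, proved equal on Dom.

-- ===== PORT A =====
-- seq[0:idx] + "N" + seq[idx+1:] on code points (exact: PySem slices; concatenation of char lists)
def pvSubst (seq : String) (idx : Nat) : String :=
  String.ofList (PySem.List.slice seq.toList (some (0 : Int)) (some (idx : Int)) ++ ['N'] ++
                 PySem.List.slice seq.toList (some ((idx : Int) + 1)) none)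

-- the `for idx, bp in enumerate(seq)` loop of A, carrying the accumulator `res`
def gmAgo (seq : String) (num_mismatch : Int) (cdepth : Int) (idxs : List Nat) (res : List String) : List String :=
  match idxs with
  | [] => res
  | idx :: rest =>
      let newseq := pvSubst seq idx
      let res' := res ++ [newseq]
      if cdepth < num_mismatch then
        gmAgo seq num_mismatch cdepth rest
          (res' ++ gmAgo newseq num_mismatch (cdepth + 1) (List.range newseq.toList.length) [])
      else
        gmAgo seq num_mismatch cdepth rest res'
termination_by ((num_mismatch - cdepth).toNat, idxs.length)
decreasing_by
  · apply Prod.Lex.left; omega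
  · apply Prod.Lex.right; simp
  · apply Prod.Lex.right; simp

def generate_mismatches (seq : String) (num_mismatch : Int) (cdepth : Int) : List String :=
  gmAgo seq num_mismatch cdepth (List.range seq.toList.length) []

-- ===== PORT B =====
-- [(s[:i] + "N" + s[i+1:], c) for i in range(len(s))]
def pvChildren (s : String) (c : Int) : List (String × Int) :=
  (List.range s.toList.length).map (fun i => (pvSubst s i, c))

-- size of the subtree below one stack item: termination measure for the stack loop
def pvW (n : Nat) : Nat → Nat
  | 0 => 1
  | d + 1 => 1 + n * pvW n d

-- substitution keeps the length (the port of the stack loop needs this for its measure)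
theorem pvSubst_length (s : String) (i : Nat) (h : i < s.toList.length) :
    (pvSubst s i).toList.length = s.toList.length := by
  have h1 : ((i : Int) + 1) = ((i + 1 : Nat) : Int) := by push_cast; ring
  simp only [pvSubst, String.toList_ofList, h1, PySem.List.slice_zero_start,
    PySem.List.slice_to_natCast, PySem.List.slice_from_natCast, List.length_append,
    List.length_take, List.length_drop, List.length_cons, List.length_nil]
  omega

theorem pvChildren_weight (num : Int) (s : String) (c : Int) :
    ((pvChildren s c).map (fun p => pvW p.1.toList.length (num - p.2).toNat)).sum
      = s.toList.length * pvW s.toList.length (num - c).toNat := by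
  simp only [pvChildren, List.map_map]
  rw [List.map_congr_left (g := fun _ => pvW s.toList.length (num - c).toNat)
      (fun i hi => by simp [Function.comp, pvSubst_length s i (List.mem_range.mp hi)])]
  simp [List.map_const']

-- B's `while stack:` loop; the Python stack pops from the END, mirrored here as the HEAD
def gmAltGo (num_mismatch : Int) (stack : List (String × Int)) (res : List String) : List String :=
  match stack with
  | [] => res
  | (s, level) :: rest =>
      if level < num_mismatch then
        gmAltGo num_mismatch (pvChildren s (level + 1) ++ rest) (res ++ [s])
      else
        gmAltGo num_mismatch rest (res ++ [s])
termination_by (stack.map (fun p => pvW p.1.toList.length (num_mismatch - p.2).toNat)).sum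
decreasing_by
  · rename_i h
    simp only [List.map_cons, List.map_append, List.sum_cons, List.sum_append]
    rw [pvChildren_weight]
    have hd : (num_mismatch - level).toNat = (num_mismatch - (level + 1)).toNat + 1 := by omega
    rw [hd]; simp only [pvW]; omega
  · simp only [List.map_cons, List.sum_cons]
    have hpos : 0 < pvW s.toList.length (num_mismatch - level).toNat := by
      cases h : (num_mismatch - level).toNat <;> simp [pvW]
    omega

def generate_mismatches_alt (seq : String) (num_mismatch : Int) (cdepth : Int) : List String :=
  gmAltGo num_mismatch (pvChildren seq cdepth) []

-- ===== PRECONDITION & SPEC =====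
-- Pre_ excludes the inputs whose recursion depth num_mismatch - cdepth exceeds CPython's default
-- recursion limit, where Python A raises RecursionError (the exact limit depends on the caller's
-- stack, so Pre_ stops at 995, just below the default limit).
def Pre_generate_mismatches (seq : String) (num_mismatch : Int) (cdepth : Int) : Prop :=
  seq.toList = [] ∨ num_mismatch - cdepth ≤ 995
instance (seq : String) (num_mismatch : Int) (cdepth : Int) : Decidable (Pre_generate_mismatches seq num_mismatch cdepth) := by unfold Pre_generate_mismatches; infer_instance
def pvWitness_generate_mismatches : String × Int × Int := ("AC", 2, 1)

def Spec_generate_mismatches (seq : String) (num_mismatch : Int) (cdepth : Int) (out : List String) : Prop := out = generate_mismatches_alt seq num_mismatch cdepth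
instance (seq : String) (num_mismatch : Int) (cdepth : Int) (out : List String) : Decidable (Spec_generate_mismatches seq num_mismatch cdepth out) := by unfold Spec_generate_mismatches; infer_instance

-- ===== CLAIM (what is proved, stated in full; the proofs are below) =====
def Claim_equal_generate_mismatches : Prop := ∀ (seq : String) (num_mismatch : Int) (cdepth : Int), Dom_generate_mismatches seq num_mismatch cdepth → Pre_generate_mismatches seq num_mismatch cdepth → Spec_generate_mismatches seq num_mismatch cdepth (generate_mismatches seq num_mismatch cdepth)

-- ===== LEMMAS AND PROOFS =====
-- output of one stack item: itself, then (if deep enough) A's whole subtree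
def pvF (num : Int) (p : String × Int) : List String :=
  p.1 :: (if p.2 < num then generate_mismatches p.1 num (p.2 + 1) else [])

theorem gmAgo_spec (num c : Int) (seq : String) (idxs : List Nat) (res : List String) :
    gmAgo seq num c idxs res
      = res ++ idxs.flatMap (fun i => pvF num (pvSubst seq i, c)) := by
  induction idxs generalizing res with
  | nil => simp [gmAgo]
  | cons idx rest ih =>
      rw [gmAgo]
      by_cases h : c < num
      · simp only [h, if_pos, ih, pvF, generate_mismatches]
        simp [List.flatMap_cons]
      · simp only [h, if_neg, not_false_iff, ih, pvF]
        simp [List.flatMap_cons]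

theorem A_eq_flatMap (num c : Int) (seq : String) :
    generate_mismatches seq num c = (pvChildren seq c).flatMap (pvF num) := by
  rw [generate_mismatches, gmAgo_spec, pvChildren, List.flatMap_map]
  simp

theorem gmAltGo_spec (num : Int) (stack : List (String × Int)) (res : List String) :
    gmAltGo num stack res = res ++ stack.flatMap (pvF num) := by
  fun_induction gmAltGo <;> simp_all [pvF, ← A_eq_flatMap]

-- ===== VERDICT (by name: the statement is the Claim_ definition above) =====
theorem generate_mismatches_spec : Claim_equal_generate_mismatches := by
  intro seq num cdepth _ _
  unfold Spec_generate_mismatches generate_mismatches_alt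
  rw [gmAltGo_spec, A_eq_flatMap]
  simp
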